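-- pv_equiv track=rewrite | github.com/Akshat190/gitbriefly | gitbrief/ai/prompts.py | get_week_summarization_prompt
-- ===== SOURCE A (Python) =====
-- from typing import Dict, List
--
-- def get_week_summarization_prompt(commits: List[Dict]) -> str:
--     """Generate prompt for weekly summary."""
--
--     by_day = {}
--     for commit in commits:
--         day = commit.get("date", "")[:10]
--         if day not in by_day:
--             by_day[day] = []
--         by_day[day].append(commit)
--
--     daily_summaries = []
--     for day, day_commits in sorted(by_day.items()):
--         repo_groups = {}
--         for c in day_commits:
--             repo = c.get("repo", "unknown")
--             if repo not in repo_groups: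
--                 repo_groups[repo] = []
--             repo_groups[repo].append(c["message"])
--
--         summary = f"{day}:\n"
--         for repo, msgs in repo_groups.items():
--             summary += f"  [{repo}]: {len(msgs)} commits\n"
--
--         daily_summaries.append(summary)
--
--     commits_text = "\n".join(daily_summaries)
--
--     prompt = f"""You are a developer assistant that summarizes Git activity into a weekly briefing.
--
-- Analyze the following commits from the last 7 days.
--
-- Commits by day:
-- {commits_text}
--
-- Generate a weekly briefing with:
--
-- ## 🧠 Week Summary
-- What was accomplished each day. Group by project.
--
-- ## ⚠️ Risks
-- Potential issues or unfinished work.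
--
-- ## 🎯 This Week's Goals
-- What should be focused on next week.
--
-- Be concise."""
--
--     return prompt
-- ===== SOURCE B (Python) =====
-- from typing import Dict, List
--
-- _HEAD = """You are a developer assistant that summarizes Git activity into a weekly briefing.
--
-- Analyze the following commits from the last 7 days.
--
-- Commits by day:
-- """
--
-- _TAIL = """
--
-- Generate a weekly briefing with:
--
-- ## 🧠 Week Summary
-- What was accomplished each day. Group by project.
--
-- ## ⚠️ Risks
-- Potential issues or unfinished work.
--
-- ## 🎯 This Week's Goals
-- What should be focused on next week.
--
-- Be concise."""
--
--
-- def get_week_summarization_prompt(commits: List[Dict]) -> str: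
--     """Generate prompt for weekly summary."""
--     days = sorted({c.get("date", "")[:10] for c in commits})
--     parts = []
--     for day in days:
--         msgs_by_repo = {}
--         for c in commits:
--             if c.get("date", "")[:10] == day:
--                 msgs_by_repo.setdefault(c.get("repo", "unknown"), []).append(c["message"])
--         lines = "".join(f"  [{repo}]: {len(msgs)} commits\n" for repo, msgs in msgs_by_repo.items())
--         parts.append(f"{day}:\n{lines}")
--     return _HEAD + "\n".join(parts) + _TAIL
-- ===== Notes on version B (the rewrite author's own statement) =====
-- stated objective: alternative
-- what changed: B drops A's by_day dict-of-lists grouping pass: it sorts the distinct day keys, then for each day makes one filtered scan over the commits collecting messages per repo and emits the counts; Pre_ excludes commit lists where some commit lacks the 'message' key, on which both A and B raise KeyError.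
import Mathlib
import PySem

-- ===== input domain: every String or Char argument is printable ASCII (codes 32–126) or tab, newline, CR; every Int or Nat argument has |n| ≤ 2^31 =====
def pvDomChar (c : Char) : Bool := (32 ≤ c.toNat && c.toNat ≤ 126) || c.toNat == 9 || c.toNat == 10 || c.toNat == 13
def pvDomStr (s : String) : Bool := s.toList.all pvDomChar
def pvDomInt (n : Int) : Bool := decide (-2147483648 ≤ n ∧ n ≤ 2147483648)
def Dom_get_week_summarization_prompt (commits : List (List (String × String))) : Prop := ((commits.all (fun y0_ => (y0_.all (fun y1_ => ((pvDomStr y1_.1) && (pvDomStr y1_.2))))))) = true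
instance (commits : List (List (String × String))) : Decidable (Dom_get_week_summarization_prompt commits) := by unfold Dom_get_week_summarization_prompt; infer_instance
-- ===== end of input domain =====

-- B builds the prompt without the by_day dict-of-lists: sorted distinct day keys, then one
-- filtered scan per day collecting messages per repo; same return value on Pre_.
-- Shared literal pieces (the f-string template and line, identical text in A and B):

def pvHead : String := "You are a developer assistant that summarizes Git activity into a weekly briefing.\n\nAnalyze the following commits from the last 7 days.\n\nCommits by day:\n"

def pvTail : String := "\n\nGenerate a weekly briefing with:\n\n## 🧠 Week Summary\nWhat was accomplished each day. Group by project.\n\n## ⚠️ Risks\nPotential issues or unfinished work.\n\n## 🎯 This Week's Goals\nWhat should be focused on next week.\n\nBe concise."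

-- commit.get("date", "")[:10]
def pvDay (c : List (String × String)) : String :=
  PySem.Str.slice ((PySem.Dict.mk c).getD "date" "") none (some 10)

-- c.get("repo", "unknown")
def pvRepo (c : List (String × String)) : String :=
  (PySem.Dict.mk c).getD "repo" "unknown"

-- c["message"] raises KeyError when absent (excluded by Pre_ in both programs); under Pre_ the
-- get? is some, so the "" default is never used.
def pvMsg (c : List (String × String)) : String :=
  ((PySem.Dict.mk c).get? "message").getD ""

-- the f-string "  [{repo}]: {n} commits\n"
def pvLine (repo : String) (n : Int) : String :=
  "  [" ++ repo ++ "]: " ++ PySem.Int.toStr n ++ " commits\n"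

-- ===== PORT A =====
-- sorted(by_day.items()) compares tuples, but the dict keys are distinct, so Python only ever
-- compares the first components: ported as sort by key fst.
def get_week_summarization_prompt (commits : List (List (String × String))) : String :=
  let by_day : PySem.Dict String (List (List (String × String))) :=
    commits.foldl (fun d commit => d.modify (pvDay commit) [] (fun l => l ++ [commit]))
      PySem.Dict.empty
  let daily_summaries : List String :=
    (PySem.List.sorted by_day.items (fun p => p.1)).foldl (fun acc p =>
      let repo_groups : PySem.Dict String (List String) :=
        p.2.foldl (fun rg c => rg.modify (pvRepo c) [] (fun l => l ++ [pvMsg c]))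
          PySem.Dict.empty
      let summary : String :=
        repo_groups.items.foldl (fun s q => s ++ pvLine q.1 (q.2.length : Int)) (p.1 ++ ":\n")
      acc ++ [summary]) []
  let commits_text := PySem.Str.join "\n" daily_summaries
  pvHead ++ commits_text ++ pvTail

-- ===== PORT B =====
def get_week_summarization_prompt_alt (commits : List (List (String × String))) : String :=
  let days : List String :=
    PySem.List.sorted (PySem.Set.ofList (commits.map pvDay)) (fun x => x)
  let parts : List String := days.map (fun day =>
    let msgs_by_repo : PySem.Dict String (List String) :=
      commits.foldl (fun d c =>
        if pvDay c == day then d.modify (pvRepo c) [] (fun l => l ++ [pvMsg c])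
        else d) PySem.Dict.empty
    day ++ ":\n"
      ++ PySem.Str.join "" (msgs_by_repo.items.map (fun q => pvLine q.1 (q.2.length : Int))))
  pvHead ++ PySem.Str.join "\n" parts ++ pvTail

-- ===== PRECONDITION & SPEC =====
-- Pre_ excludes exactly the commits lists where some commit lacks the "message" key: there A
-- (and B alike) raises KeyError while grouping the messages.
def Pre_get_week_summarization_prompt (commits : List (List (String × String))) : Prop :=
  ∀ c ∈ commits, "message" ∈ c.map Prod.fst
instance (commits : List (List (String × String))) : Decidable (Pre_get_week_summarization_prompt commits) := by unfold Pre_get_week_summarization_prompt; infer_instance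

def pvWitness_get_week_summarization_prompt : (List (List (String × String))) :=
  [[("date", "2024-01-02"), ("repo", "r1"), ("message", "m")],
   [("date", "2024-01-01"), ("message", "n")]]

def Spec_get_week_summarization_prompt (commits : List (List (String × String))) (out : String) : Prop := out = get_week_summarization_prompt_alt commits
instance (commits : List (List (String × String))) (out : String) : Decidable (Spec_get_week_summarization_prompt commits out) := by unfold Spec_get_week_summarization_prompt; infer_instance

-- ===== CLAIM (what is proved, stated in full; the proofs are below) =====
def Claim_equal_get_week_summarization_prompt : Prop := ∀ (commits : List (List (String × String))), Dom_get_week_summarization_prompt commits → Pre_get_week_summarization_prompt commits → Spec_get_week_summarization_prompt commits (get_week_summarization_prompt commits)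

-- ===== LEMMAS AND PROOFS =====

-- "s += f(x) for x in l" equals init ++ "".join(map f l)
theorem foldl_append_eq_join {α : Type} (l : List α) (f : α → String) (init : String) :
    l.foldl (fun s x => s ++ f x) init = init ++ PySem.Str.join "" (l.map f) := by
  induction l generalizing init with
  | nil =>
      apply String.toList_inj.mp
      simp [PySem.Str.toList_join, PySem.Chars.join_nil]
  | cons a t ih =>
      rw [List.foldl_cons, ih]
      apply String.toList_inj.mp
      cases t with
      | nil => simp [PySem.Str.toList_join, PySem.Chars.join_singleton, PySem.Chars.join_nil]
      | cons b t' =>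
          simp [PySem.Str.toList_join, PySem.Chars.join_cons_cons]

-- the A-side grouping dict: its lookups are the day-filtered sublists
theorem dayFold_getD (commits : List (List (String × String))) (day : String) :
    (commits.foldl (fun d commit => d.modify (pvDay commit) [] (fun l => l ++ [commit]))
        PySem.Dict.empty).getD day []
      = commits.filter (fun c => pvDay c == day) := by
  have h := PySem.Dict.getD_foldl_modify_append
    (commits.map (fun c => (pvDay c, c))) PySem.Dict.empty day
  rw [List.foldl_map] at h
  simpa [List.filter_map, Function.comp_def] using h

theorem dayFold_keys (commits : List (List (String × String))) :
    (commits.foldl (fun d commit => d.modify (pvDay commit) [] (fun l => l ++ [commit]))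
        PySem.Dict.empty).keys
      = PySem.Set.ofList (commits.map pvDay) := by
  have h := PySem.Dict.keys_foldl_modify_key commits pvDay ([] : List (List (String × String)))
    (fun _ c l => l ++ [c]) PySem.Dict.empty
  rw [h, PySem.Dict.keys_empty]; exact PySem.Set.update_empty _

-- the per-day summary strings of A and B coincide: B's guarded fold over all commits is A's fold
-- over the day-filtered sublist, and "+=" accumulation is "".join of the mapped items
theorem perDay (commits : List (List (String × String))) (day : String) :
    ((commits.filter (fun c => pvDay c == day)).foldl (fun rg c =>
        rg.modify (pvRepo c) [] (fun l => l ++ [pvMsg c])) PySem.Dict.empty).items.foldl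
          (fun s q => s ++ pvLine q.1 (q.2.length : Int)) (day ++ ":\n")
      = day ++ ":\n" ++ PySem.Str.join ""
          (((commits.foldl (fun d c =>
              if pvDay c == day then d.modify (pvRepo c) [] (fun l => l ++ [pvMsg c]) else d)
              PySem.Dict.empty).items).map (fun q => pvLine q.1 (q.2.length : Int))) := by
  rw [List.foldl_filter]
  exact foldl_append_eq_join _ _ _

-- ===== VERDICT =====
set_option maxRecDepth 4000 in
theorem get_week_summarization_prompt_spec : Claim_equal_get_week_summarization_prompt := by
  intro commits _ _
  unfold Spec_get_week_summarization_prompt get_week_summarization_prompt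
    get_week_summarization_prompt_alt
  simp only []
  congr 1
  · congr 1
    -- daily_summaries = parts
    set by_day := commits.foldl
      (fun d commit => d.modify (pvDay commit) [] (fun l => l ++ [commit])) PySem.Dict.empty
      with hbd
    set days := PySem.List.sorted (PySem.Set.ofList (commits.map pvDay)) (fun x => x) with hdays
    have hsorted : PySem.List.sorted by_day.items (fun p => p.1)
        = days.map (fun k => (k, by_day.getD k [])) := by
      apply PySem.List.sorted_eq_of_perm_of_pairwise_lt
      · have hk : by_day.keys = PySem.Set.ofList (commits.map pvDay) := dayFold_keys commits
        have hnd : by_day.keys.Nodup := by rw [hk]; exact PySem.Set.nodup_ofList _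
        rw [PySem.Dict.items_eq_map_keys by_day hnd ([] : List (List (String × String))), hk]
        exact (PySem.List.sorted_perm _ _ _).map _
      · have := PySem.List.sorted_ofList_pairwise_lt (commits.map pvDay)
        rw [← hdays] at this
        exact List.pairwise_map.mpr this
    rw [hsorted, PySem.List.foldl_append_singleton_eq_map, List.nil_append, List.map_map]
    congr 1
    apply List.map_congr_left
    intro day _
    simp only [Function.comp_def, hbd, dayFold_getD]
    exact perDay commits day
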